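-- pv_equiv track=rewrite | github.com/oculometric/School-Misc | harshad.py | do_harshad
-- ===== SOURCE A (Python) =====
-- def digits (n):
--     if (n < 10): return [n]
--     return [(n % 10)] + digits(n//10)
--
-- def do_harshad (n):
--     i = 1
--     last = -1
--     r = 1
--     while (i <= n):
--         if (r % sum(digits(r)) == 0):
--             print ("Found "+str(r))
--             last = r
--             i += 1
--         r += 1
--     return last
-- ===== SOURCE B (Python) =====
-- def _digit_sum(m):
--     s = 0
--     while m:
--         m, d = divmod(m, 10)
--         s += d
--     return s
--
-- def _next_harshad(r):
--     while r % _digit_sum(r):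
--         r += 1
--     return r
--
-- def do_harshad(n):
--     found = []
--     r = 1
--     while len(found) < n:
--         h = _next_harshad(r)
--         found.append(h)
--         print("Found " + str(h))
--         r = h + 1
--     return found[-1] if found else -1
-- ===== Notes on version B (the rewrite author's own statement) =====
-- stated objective: faster
-- what changed: Replaces A's fused while-loop (found-counter plus a recursive list-building digit helper summed per candidate) with a separate 'smallest Harshad number >= r' search using an iterative divmod digit-sum accumulator, consumed by a loop that collects the first n results into a list and returns its last element; dropping per-candidate list construction and recursion gives a constant-factor speedup.
import Mathlib
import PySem

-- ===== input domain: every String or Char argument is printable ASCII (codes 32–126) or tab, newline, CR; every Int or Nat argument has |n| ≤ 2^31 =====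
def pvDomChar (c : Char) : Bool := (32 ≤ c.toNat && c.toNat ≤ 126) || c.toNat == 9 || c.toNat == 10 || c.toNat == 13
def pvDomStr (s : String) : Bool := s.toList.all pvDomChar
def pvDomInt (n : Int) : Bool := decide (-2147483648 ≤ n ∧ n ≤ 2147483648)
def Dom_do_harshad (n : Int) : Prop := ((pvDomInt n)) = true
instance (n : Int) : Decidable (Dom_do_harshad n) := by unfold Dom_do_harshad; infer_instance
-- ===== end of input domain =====

-- B separates the work into a 'smallest Harshad number ≥ r' search (with an iterative
-- divmod digit sum) and a loop that collects the first n results into a list and returns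
-- its last element, instead of A's single fused while-loop with a found-counter and a
-- recursive list-building digit helper; the equivalence is about the RETURN value only
-- (both Pythons print the same lines).

-- ===== PORT A =====
-- `pge m` = the smallest power of 10 that is ≥ m; only a termination measure for A's
-- while-loop (the candidate r is at most `pge r - r` steps from the next Harshad number,
-- because every power of 10 has digit sum 1 and is therefore Harshad).
theorem pge_dec (m : Nat) (h : ¬ m ≤ 1) : (m + 9) / 10 < m := by
  have h2 : 2 ≤ m := Nat.not_le.mp h
  refine (Nat.div_lt_iff_lt_mul (by norm_num)).mpr ?_
  calc m + 9 < m + 18 := Nat.add_lt_add_left (by norm_num) m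
    _ ≤ m + m * 9 := Nat.add_le_add_left (le_trans (by norm_num) (Nat.mul_le_mul_right 9 h2)) m
    _ = m * 10 := by ring

def pge (m : Nat) : Nat :=
  if h : m ≤ 1 then 1 else 10 * pge ((m + 9) / 10)
termination_by m
decreasing_by exact pge_dec m h

theorem pge_ge (m : Nat) : m ≤ pge m := by
  induction m using Nat.strong_induction_on with
  | _ m ih =>
    rw [pge]
    split_ifs with h
    · exact h
    · have hih := ih ((m + 9) / 10) (pge_dec m h)
      have hd : m + 9 < 10 * ((m + 9) / 10 + 1) := Nat.lt_mul_div_succ (m + 9) (by norm_num)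
      have hm : m ≤ 10 * ((m + 9) / 10) := by
        have : m + 9 < 10 * ((m + 9) / 10) + 1 + 9 := by
          calc m + 9 < 10 * ((m + 9) / 10 + 1) := hd
            _ = 10 * ((m + 9) / 10) + 1 + 9 := by ring
        exact Nat.lt_succ_iff.mp (Nat.lt_of_add_lt_add_right this)
      exact le_trans hm (Nat.mul_le_mul_left 10 hih)

theorem pge_pow (m : Nat) : ∃ k, pge m = 10 ^ k := by
  induction m using Nat.strong_induction_on with
  | _ m ih =>
    rw [pge]
    split_ifs with h
    · exact ⟨0, rfl⟩
    · obtain ⟨k, hk⟩ := ih _ (pge_dec m h)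
      exact ⟨k + 1, by rw [hk]; ring⟩

theorem pge_le_pow (m k : Nat) (h : m ≤ 10 ^ k) : pge m ≤ 10 ^ k := by
  induction k generalizing m with
  | zero =>
    have : m ≤ 1 := by simpa using h
    rw [pge]; simp [this]
  | succ j ih =>
    by_cases h1 : m ≤ 1
    · rw [pge]; simp only [h1, dite_true]
      exact Nat.one_le_pow _ _ (by norm_num)
    · rw [pge]; simp only [h1, dite_false]
      have hp : (10:Nat) ^ (j+1) = 10 * 10 ^ j := by ring
      have hdd : (m + 9) / 10 ≤ 10 ^ j := by
        have h1 : m + 9 ≤ 10 * 10 ^ j + 9 := Nat.add_le_add_right (hp ▸ h) 9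
        have h2 := Nat.div_le_div_right (c := 10) h1
        rw [Nat.mul_add_div (by norm_num)] at h2
        simpa using h2
      calc 10 * pge ((m + 9) / 10) ≤ 10 * 10 ^ j := Nat.mul_le_mul_left 10 (ih _ hdd)
        _ = 10 ^ (j + 1) := by ring

-- helper `digits` of Source A (its argument is the loop counter r ≥ 1 resp. r // 10, always
-- a natural number, so Nat `%`/`/` agree with Python's `%`/`//` here)
theorem digitsA_dec (m : Nat) (h : ¬ m < 10) : m / 10 < m :=
  Nat.div_lt_self (lt_of_lt_of_le (by norm_num) (Nat.not_lt.mp h)) (by norm_num)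

def digitsA (m : Nat) : List Nat :=
  if m < 10 then [m] else (m % 10) :: digitsA (m / 10)
termination_by m
decreasing_by exact digitsA_dec m (by assumption)

theorem sumDigitsA_pow10 (k : Nat) : (digitsA (10 ^ k)).sum = 1 := by
  induction k with
  | zero => rw [pow_zero, digitsA]; norm_num
  | succ j ih =>
    have h10 : ¬ (10:Nat) ^ (j+1) < 10 := by
      have : (10:Nat) ^ 1 ≤ 10 ^ (j+1) := Nat.pow_le_pow_right (by norm_num) (by omega)
      simpa using this
    have hp : (10:Nat) ^ (j+1) = 10 ^ j * 10 := by ring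
    have h1 : 10 ^ (j + 1) % 10 = 0 := by rw [hp]; exact Nat.mul_mod_left _ _
    have h2 : 10 ^ (j + 1) / 10 = 10 ^ j := by rw [hp]; exact Nat.mul_div_cancel _ (by norm_num)
    rw [digitsA, if_neg h10, h1, h2]
    simp [ih]

-- a non-Harshad r is not a power of 10, hence pge r ≠ r
theorem nonharshad_ne_pge (r : Nat) (h : ¬ r % (digitsA r).sum = 0) : pge r ≠ r := by
  intro he
  obtain ⟨k, hk⟩ := pge_pow r
  rw [he] at hk
  subst hk
  rw [sumDigitsA_pow10] at h
  exact h (Nat.mod_one _)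

theorem pge_step (r : Nat) (h : pge r ≠ r) : pge (r + 1) - (r + 1) < pge r - r := by
  have hlt : r < pge r := lt_of_le_of_ne (pge_ge r) (fun e => h e.symm)
  obtain ⟨k, hk⟩ := pge_pow r
  have h3 : pge (r + 1) ≤ pge r :=
    le_of_le_of_eq (pge_le_pow (r + 1) k (hk ▸ Nat.succ_le_of_lt hlt)) hk.symm
  calc pge (r + 1) - (r + 1) ≤ pge r - (r + 1) := Nat.sub_le_sub_right h3 _
    _ < pge r - r := Nat.sub_lt_sub_left hlt (Nat.lt_succ_self r)

theorem loopA_dec1 (n i : Int) (h : i ≤ n) : (n + 1 - (i + 1)).toNat < (n + 1 - i).toNat := by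
  have e1 : n + 1 - (i + 1) = n - i := by ring
  have e2 : n + 1 - i = (n - i) + 1 := by ring
  rw [e1, e2]
  have h0 : (0:Int) ≤ n - i := Int.sub_nonneg.mpr h
  have h1 := Int.lt_add_one_of_le (le_refl (n - i))
  exact (Int.toNat_lt_toNat (lt_of_le_of_lt h0 h1)).mpr h1

-- the while-loop of A: state (i, last, r); r starts at 1 and only increments, so it is
-- carried as a Nat (last is the Int result, -1 before the first find)
def loopA (n i : Int) (last : Int) (r : Nat) : Int :=
  if i ≤ n then
    if r % (digitsA r).sum = 0 then loopA n (i + 1) (r : Int) (r + 1)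
    else loopA n i last (r + 1)
  else last
termination_by ((n + 1 - i).toNat, pge r - r)
decreasing_by
  · apply Prod.Lex.left; exact loopA_dec1 n i (by assumption)
  · apply Prod.Lex.right; exact pge_step r (nonharshad_ne_pge r (by assumption))

def do_harshad (n : Int) : Int := loopA n 1 (-1) 1

-- ===== PORT B =====
-- _digit_sum of Source B: divmod accumulator loop
def dsB (s m : Nat) : Nat :=
  if m = 0 then s else dsB (s + m % 10) (m / 10)
termination_by m
decreasing_by exact Nat.div_lt_self (Nat.pos_of_ne_zero (by assumption)) (by norm_num)

theorem dsB_pow (s k : Nat) : dsB s (10 ^ k) = s + 1 := by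
  induction k generalizing s with
  | zero => rw [pow_zero, dsB]; norm_num; rw [dsB]; norm_num
  | succ j ih =>
    rw [dsB]
    have hz : (10:Nat) ^ (j + 1) ≠ 0 := pow_ne_zero _ (by norm_num)
    have hm : (10:Nat) ^ (j + 1) % 10 = 0 := by
      rw [pow_succ]; exact Nat.mul_mod_left _ _
    have hd : (10:Nat) ^ (j + 1) / 10 = 10 ^ j := by
      rw [pow_succ]; exact Nat.mul_div_cancel _ (by norm_num)
    simp only [hz, if_false, hm, hd, Nat.add_zero]
    exact ih s

-- termination of B's search: a candidate failing the test is not a power of 10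
-- (powers of 10 have digit sum 1), so it lies strictly below 10 ^ clog 10 of itself
theorem nextHB_dec (r : Nat) (h : ¬ r % dsB 0 r = 0) :
    10 ^ Nat.clog 10 (r + 1) - (r + 1) < 10 ^ Nat.clog 10 r - r := by
  have hne : r ≠ 10 ^ Nat.clog 10 r := by
    intro he
    apply h
    rw [he, dsB_pow]
    omega
  have hlt : r < 10 ^ Nat.clog 10 r :=
    lt_of_le_of_ne (Nat.le_pow_clog (by norm_num) r) hne
  have hcl : Nat.clog 10 (r + 1) ≤ Nat.clog 10 r :=
    (Nat.clog_le_iff_le_pow (by norm_num)).mpr hlt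
  have hpow : (10:Nat) ^ Nat.clog 10 (r + 1) ≤ 10 ^ Nat.clog 10 r :=
    Nat.pow_le_pow_right (by norm_num) hcl
  omega

-- _next_harshad of Source B: smallest Harshad number ≥ r
def nextHB (r : Nat) : Nat :=
  if r % dsB 0 r = 0 then r else nextHB (r + 1)
termination_by 10 ^ Nat.clog 10 r - r
decreasing_by exact nextHB_dec r (by assumption)

-- the while-loop of do_harshad in Source B: grows `found` until it holds n results
def loopB (n : Int) (found : List Int) (r : Nat) : List Int :=
  if (found.length : Int) < n then
    loopB n (found ++ [(nextHB r : Int)]) (nextHB r + 1)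
  else found
termination_by (n - found.length).toNat
decreasing_by simp only [List.length_append, List.length_cons, List.length_nil]; omega

-- `found[-1] if found else -1` is the last element, defaulting to -1 on []
def do_harshad_alt (n : Int) : Int := (loopB n [] 1).getLastD (-1)

-- ===== PRECONDITION & SPEC =====
def Spec_do_harshad (n : Int) (out : Int) : Prop := out = do_harshad_alt n
instance (n : Int) (out : Int) : Decidable (Spec_do_harshad n out) := by unfold Spec_do_harshad; infer_instance

-- ===== CLAIM =====
def Claim_equal_do_harshad : Prop := ∀ (n : Int), Dom_do_harshad n → Spec_do_harshad n (do_harshad n)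

-- ===== LEMMAS AND PROOFS =====

-- B's accumulator digit sum computes the sum of A's digit list
theorem dsB_eq (s m : Nat) : dsB s m = s + (digitsA m).sum := by
  induction m using Nat.strong_induction_on generalizing s with
  | _ m ih =>
    rw [dsB]
    split_ifs with h
    · subst h; rw [digitsA]; norm_num
    · rw [ih _ (Nat.div_lt_self (Nat.pos_of_ne_zero h) (by norm_num))]
      by_cases h10 : m < 10
      · have e0 : digitsA 0 = [0] := by rw [digitsA]; norm_num
        have em : digitsA m = [m] := by rw [digitsA, if_pos h10]
        rw [Nat.mod_eq_of_lt h10, Nat.div_eq_of_lt h10, e0, em]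
        simp
      · have em : digitsA m = m % 10 :: digitsA (m / 10) := by rw [digitsA, if_neg h10]
        rw [em, List.sum_cons]
        exact Nat.add_assoc s (m % 10) (digitsA (m / 10)).sum

-- invariant linking A's state (i, last) to B's list: i = |found| + 1 and
-- last = the last found value (-1 if none)
theorem loopA_eq_loopB (n i last : Int) (r : Nat) :
    ∀ found : List Int, (found.length : Int) + 1 = i → found.getLastD (-1) = last →
      loopA n i last r = (loopB n found r).getLastD (-1) := by
  fun_induction loopA n i last r with
  | case1 i last r hle hh ih =>
    intro found h1 h2
    have hcond : (found.length : Int) < n := by omega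
    have hnx : nextHB r = r := by rw [nextHB]; simp [dsB_eq, hh]
    rw [loopB, if_pos hcond, hnx]
    refine ih (found ++ [(r : Int)]) ?_ ?_
    · simp only [List.length_append, List.length_cons, List.length_nil]
      push_cast
      omega
    · exact List.getLastD_concat
  | case2 i last r hle hh ih =>
    intro found h1 h2
    have hcond : (found.length : Int) < n := by omega
    have hnx : nextHB r = nextHB (r + 1) := by rw [nextHB]; simp [dsB_eq, hh]
    have hB : loopB n found r = loopB n found (r + 1) := by
      conv_lhs => rw [loopB]
      conv_rhs => rw [loopB]
      rw [if_pos hcond, if_pos hcond, hnx]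
    rw [hB]
    exact ih found h1 h2
  | case3 i last r hle =>
    intro found h1 h2
    rw [loopB, if_neg (by omega)]
    exact h2.symm

-- ===== VERDICT =====
theorem do_harshad_spec : Claim_equal_do_harshad := by
  intro n _
  unfold Spec_do_harshad do_harshad do_harshad_alt
  exact loopA_eq_loopB n 1 (-1) 1 [] (by simp) rfl
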